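-- pv_equiv track=rewrite | github.com/yksirotta/openmanusguiplus-coolify | app/web_app.py | mask_sensitive_config
-- ===== SOURCE A (Python) =====
-- def mask_sensitive_config(config):
--     """Mask sensitive information in configuration"""
--     masked = {}
--
--     # Deep copy while masking API keys
--     for section, values in config.items():
--         if isinstance(values, dict):
--             masked[section] = {}
--             for key, value in values.items():
--                 if isinstance(value, dict):
--                     masked[section][key] = {}
--                     for subkey, subvalue in value.items():
--                         if "api_key" in subkey.lower() and subvalue:
--                             masked[section][key][subkey] = "********"
--                         else:
--                             masked[section][key][subkey] = subvalue
--                 elif "api_key" in key.lower() and value: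
--                     masked[section][key] = "********"
--                 else:
--                     masked[section][key] = value
--         else:
--             masked[section] = values
--
--     return masked
-- ===== SOURCE B (Python) =====
-- def mask_sensitive_config(config):
--     """Mask sensitive information in configuration"""
--     def walk(d, depth):
--         out = {}
--         for k, v in d.items():
--             if isinstance(v, dict) and depth < 2:
--                 out[k] = walk(v, depth + 1)
--             elif depth >= 1 and "api_key" in k.lower() and v:
--                 out[k] = "********"
--             else:
--                 out[k] = v
--         return out
--     return walk(config, 0)
-- ===== Notes on version B (the rewrite author's own statement) =====
-- stated objective: simpler
-- what changed: Replaces the three hand-unrolled nested dict-building loops with a single recursive walk(d, depth) helper that preserves the exact depth-dependent masking.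
import Mathlib
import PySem

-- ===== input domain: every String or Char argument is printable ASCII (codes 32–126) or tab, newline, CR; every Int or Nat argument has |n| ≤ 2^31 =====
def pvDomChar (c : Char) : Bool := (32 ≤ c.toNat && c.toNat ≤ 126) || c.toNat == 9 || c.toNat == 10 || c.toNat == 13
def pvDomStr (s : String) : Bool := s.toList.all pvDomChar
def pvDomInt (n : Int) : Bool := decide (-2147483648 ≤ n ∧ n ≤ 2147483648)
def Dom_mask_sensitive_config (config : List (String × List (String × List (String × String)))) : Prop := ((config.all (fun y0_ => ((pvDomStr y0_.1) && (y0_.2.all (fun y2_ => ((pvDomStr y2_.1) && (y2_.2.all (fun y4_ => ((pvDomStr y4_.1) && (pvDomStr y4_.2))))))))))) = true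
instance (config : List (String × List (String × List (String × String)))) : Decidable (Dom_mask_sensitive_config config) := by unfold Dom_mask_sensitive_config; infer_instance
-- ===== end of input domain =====

-- B replaces A's three hand-unrolled nested dict-building loops with one recursive walk
-- keyed by depth (objective: simpler); same return value on every input of the domain.


-- ===== PORT A =====
-- Literal transliteration of A's three nested dict-building loops.  Under the task's type
-- the `isinstance(values, dict)` / `isinstance(value, dict)` tests are always true (the
-- values ARE dicts), so only those branches are expressible; the dict writes
-- `masked[section] = …` append fresh keys in insertion order (keys of a Python dict's
-- .items() are distinct).  Truthiness of a string subvalue is `subvalue ≠ ""`.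
def mask_sensitive_config (config : List (String × List (String × List (String × String)))) : List (String × List (String × List (String × String))) :=
  config.foldl (fun masked sv =>
    masked ++ [(sv.1,
      sv.2.foldl (fun m kv =>
        m ++ [(kv.1,
          kv.2.foldl (fun m2 skv =>
            m2 ++ [(skv.1,
              if PySem.Str.isIn "api_key" (PySem.Str.lower skv.1) && !(skv.2 == "")
              then "********" else skv.2)]) [])]) [])]) []

-- ===== PORT B =====
-- B is one recursive helper walk(d, depth); its Python recursion is depth-polymorphic,
-- which the fixed Lean type cannot express, so walk is monomorphised step for step into
-- one function per depth (walk0 = depth 0, walk1 = depth 1, walk2 = depth 2), each the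
-- same structural recursion over the entries.
def pvWalk2 : List (String × String) → List (String × String)
  | [] => []
  | (k, v) :: rest =>
      (k, if PySem.Str.isIn "api_key" (PySem.Str.lower k) && !(v == "") then "********" else v)
        :: pvWalk2 rest

def pvWalk1 : List (String × List (String × String)) → List (String × List (String × String))
  | [] => []
  | (k, v) :: rest => (k, pvWalk2 v) :: pvWalk1 rest

def pvWalk0 : List (String × List (String × List (String × String))) → List (String × List (String × List (String × String)))
  | [] => []
  | (k, v) :: rest => (k, pvWalk1 v) :: pvWalk0 rest

def mask_sensitive_config_alt (config : List (String × List (String × List (String × String)))) : List (String × List (String × List (String × String))) :=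
  pvWalk0 config

-- ===== PRECONDITION & SPEC =====
def Spec_mask_sensitive_config (config : List (String × List (String × List (String × String)))) (out : List (String × List (String × List (String × String)))) : Prop := out = mask_sensitive_config_alt config
instance (config : List (String × List (String × List (String × String)))) (out : List (String × List (String × List (String × String)))) : Decidable (Spec_mask_sensitive_config config out) := by unfold Spec_mask_sensitive_config; infer_instance

-- ===== CLAIM (what is proved, stated in full; the proofs are below) =====
def Claim_equal_mask_sensitive_config : Prop := ∀ (config : List (String × List (String × List (String × String)))), Dom_mask_sensitive_config config → Spec_mask_sensitive_config config (mask_sensitive_config config)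

-- ===== LEMMAS AND PROOFS =====
theorem pvWalk2_eq_map (l : List (String × String)) :
    pvWalk2 l = l.map (fun skv =>
      (skv.1, if PySem.Str.isIn "api_key" (PySem.Str.lower skv.1) && !(skv.2 == "")
              then "********" else skv.2)) := by
  induction l with
  | nil => rfl
  | cons p rest ih => cases p; simp [pvWalk2, ih]

theorem pvWalk1_eq_map (l : List (String × List (String × String))) :
    pvWalk1 l = l.map (fun kv => (kv.1, pvWalk2 kv.2)) := by
  induction l with
  | nil => rfl
  | cons p rest ih => cases p; simp [pvWalk1, ih]

theorem pvWalk0_eq_map (l : List (String × List (String × List (String × String)))) :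
    pvWalk0 l = l.map (fun sv => (sv.1, pvWalk1 sv.2)) := by
  induction l with
  | nil => rfl
  | cons p rest ih => cases p; simp [pvWalk0, ih]

-- ===== VERDICT (by name: the statement is the Claim_ definition above) =====
theorem mask_sensitive_config_spec : Claim_equal_mask_sensitive_config := by
  intro config _
  show _ = _
  unfold mask_sensitive_config mask_sensitive_config_alt
  rw [PySem.List.foldl_append_singleton_eq_map, pvWalk0_eq_map]
  simp only [List.nil_append]
  refine List.map_congr_left (fun sv _ => ?_)
  rw [PySem.List.foldl_append_singleton_eq_map, pvWalk1_eq_map]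
  simp only [List.nil_append]
  refine congrArg _ (List.map_congr_left (fun kv _ => ?_))
  rw [PySem.List.foldl_append_singleton_eq_map, pvWalk2_eq_map]
  simp
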